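-- pv_equiv track=rewrite | github.com/aws/sagemaker-hyperpod-recipes | tests/launcher/recipe_templatization/recipe_and_override_params_validators.py | validate_no_omegaconf_artifacts
-- ===== SOURCE A (Python) =====
-- from typing import Dict, List, Optional
--
-- def validate_no_omegaconf_artifacts(training_yaml_content: str, recipe_file_path: str) -> List[str]:
--     """
--     Validate that training.yaml has no OmegaConf artifacts from failed resolution.
--
--     Checks for patterns like:
--     - ${...} (unresolved interpolations)
--     - oc.select(...)
--     - OmegaConf.select(...)
--     - _target_: (Hydra instantiation patterns that shouldn't be in final output)
--
--     Args:
--         training_yaml_content: The content of training.yaml from launch.json as a string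
--         recipe_file_path: Path to the recipe file for error reporting
--
--     Returns:
--         List of validation errors
--     """
--     errors = []
--
--     # Patterns that indicate unresolved OmegaConf operations
--     omegaconf_patterns = [
--         ("${", "Unresolved OmegaConf interpolation"),
--         ("oc.select", "OmegaConf select artifact"),
--         ("OmegaConf.select", "OmegaConf select artifact"),
--         ("omegaconf.select", "OmegaConf select artifact (lowercase)"),
--     ]
--
--     for pattern, description in omegaconf_patterns:
--         if pattern in training_yaml_content:
--             # Find line numbers for better error reporting
--             lines_with_pattern = []
--             for line_num, line in enumerate(training_yaml_content.split("\n"), 1):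
--                 if pattern in line:
--                     lines_with_pattern.append(f"Line {line_num}: {line.strip()[:80]}")
--                     if len(lines_with_pattern) >= 3:  # Show max 3 examples
--                         break
--
--             error_msg = f"{description} '{pattern}' found in training.yaml:\n  " + "\n  ".join(lines_with_pattern)
--             errors.append(error_msg)
--
--     return errors
-- ===== SOURCE B (Python) =====
-- from typing import List
--
--
-- def validate_no_omegaconf_artifacts(training_yaml_content: str, recipe_file_path: str) -> List[str]:
--     """Single pass over the lines: collect up to 3 example lines per pattern,
--     then emit one error per pattern (in declared order) that occurs in the content."""
--     omegaconf_patterns = [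
--         ("${", "Unresolved OmegaConf interpolation"),
--         ("oc.select", "OmegaConf select artifact"),
--         ("OmegaConf.select", "OmegaConf select artifact"),
--         ("omegaconf.select", "OmegaConf select artifact (lowercase)"),
--     ]
--     examples = {pattern: [] for pattern, _ in omegaconf_patterns}
--     for line_num, line in enumerate(training_yaml_content.split("\n"), 1):
--         for pattern in examples:
--             if pattern in line and len(examples[pattern]) < 3:
--                 examples[pattern].append(f"Line {line_num}: {line.strip()[:80]}")
--     errors = []
--     for pattern, description in omegaconf_patterns:
--         if pattern in training_yaml_content:
--             errors.append(
--                 f"{description} '{pattern}' found in training.yaml:\n  " + "\n  ".join(examples[pattern])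
--             )
--     return errors
-- ===== Notes on version B (the rewrite author's own statement) =====
-- stated objective: alternative
-- what changed: A rescans the whole content and re-splits the lines once per pattern (4 passes plus a substring pre-check per pattern); B splits once and makes a single pass over the lines, filling a pattern-to-examples dict (capped at 3 per pattern), then emits the errors in the declared pattern order.
import Mathlib
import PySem

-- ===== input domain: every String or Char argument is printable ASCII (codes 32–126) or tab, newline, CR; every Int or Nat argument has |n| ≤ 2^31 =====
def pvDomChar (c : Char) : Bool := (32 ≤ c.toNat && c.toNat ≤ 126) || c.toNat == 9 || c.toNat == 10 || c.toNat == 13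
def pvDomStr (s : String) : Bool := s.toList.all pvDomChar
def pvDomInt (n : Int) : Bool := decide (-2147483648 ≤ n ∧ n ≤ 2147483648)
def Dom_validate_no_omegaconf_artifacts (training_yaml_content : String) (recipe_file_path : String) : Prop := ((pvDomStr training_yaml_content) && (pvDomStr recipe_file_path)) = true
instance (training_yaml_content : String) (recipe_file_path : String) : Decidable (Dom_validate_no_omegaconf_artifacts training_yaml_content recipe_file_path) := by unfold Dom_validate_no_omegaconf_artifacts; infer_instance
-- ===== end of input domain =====

-- B replaces A's per-pattern rescans of the whole content by ONE pass over the lines that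
-- fills a pattern→examples table (objective: alternative decomposition, same output).

-- ===== PORT A =====
def pvPatternsA : List (String × String) :=
  [("${", "Unresolved OmegaConf interpolation"),
   ("oc.select", "OmegaConf select artifact"),
   ("OmegaConf.select", "OmegaConf select artifact"),
   ("omegaconf.select", "OmegaConf select artifact (lowercase)")]

-- f"Line {line_num}: {line.strip()[:80]}"
def pvLineMsgA (line_num : Int) (line : String) : String :=
  "Line " ++ PySem.Int.toStr line_num ++ ": " ++ PySem.Str.slice (PySem.Str.strip line) none (some 80)

-- A's inner loop: collect matching lines, break once 3 are collected
def pvCollectA (pattern : String) (lines : List String) (line_num : Int) (acc : List String) : List String :=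
  match lines with
  | [] => acc
  | line :: rest =>
    if PySem.Str.isIn pattern line then
      let acc' := acc ++ [pvLineMsgA line_num line]
      if 3 ≤ acc'.length then acc'
      else pvCollectA pattern rest (line_num + 1) acc'
    else pvCollectA pattern rest (line_num + 1) acc

def validate_no_omegaconf_artifacts (training_yaml_content : String) (recipe_file_path : String) : List String :=
  pvPatternsA.foldl (fun errors pd =>
    if PySem.Str.isIn pd.1 training_yaml_content then
      let lines_with_pattern :=
        pvCollectA pd.1 ((PySem.Str.split? training_yaml_content "\n").getD []) 1 []
      errors ++ [pd.2 ++ " '" ++ pd.1 ++ "' found in training.yaml:\n  " ++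
                 PySem.Str.join "\n  " lines_with_pattern]
    else errors) []

-- ===== PORT B =====
def pvPatternsB : List (String × String) :=
  [("${", "Unresolved OmegaConf interpolation"),
   ("oc.select", "OmegaConf select artifact"),
   ("OmegaConf.select", "OmegaConf select artifact"),
   ("omegaconf.select", "OmegaConf select artifact (lowercase)")]

def pvLineMsgB (line_num : Int) (line : String) : String :=
  "Line " ++ PySem.Int.toStr line_num ++ ": " ++ PySem.Str.slice (PySem.Str.strip line) none (some 80)

-- body of B's inner 'for pattern in examples' loop
def pvStepKey (line_num : Int) (line : String) (d : PySem.Dict String (List String))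
    (pattern : String) : PySem.Dict String (List String) :=
  if PySem.Str.isIn pattern line && decide ((d.getD pattern []).length < 3) then
    d.modify pattern [] (fun e => e ++ [pvLineMsgB line_num line])
  else d

-- body of B's outer 'for line_num, line in enumerate(..., 1)' loop
def pvStepLine (d : PySem.Dict String (List String)) (nl : Int × String) :
    PySem.Dict String (List String) :=
  d.keys.foldl (pvStepKey nl.1 nl.2) d

def validate_no_omegaconf_artifacts_alt (training_yaml_content : String) (recipe_file_path : String) : List String :=
  let examples0 : PySem.Dict String (List String) :=
    PySem.Dict.mk (pvPatternsB.map (fun pd => (pd.1, ([] : List String))))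
  let examples :=
    (PySem.List.enumerate ((PySem.Str.split? training_yaml_content "\n").getD []) 1).foldl
      pvStepLine examples0
  pvPatternsB.foldl (fun errors pd =>
    if PySem.Str.isIn pd.1 training_yaml_content then
      errors ++ [pd.2 ++ " '" ++ pd.1 ++ "' found in training.yaml:\n  " ++
                 PySem.Str.join "\n  " (examples.getD pd.1 [])]
    else errors) []

-- ===== PRECONDITION & SPEC =====
def Spec_validate_no_omegaconf_artifacts (training_yaml_content : String) (recipe_file_path : String) (out : List String) : Prop := out = validate_no_omegaconf_artifacts_alt training_yaml_content recipe_file_path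
instance (training_yaml_content : String) (recipe_file_path : String) (out : List String) : Decidable (Spec_validate_no_omegaconf_artifacts training_yaml_content recipe_file_path out) := by unfold Spec_validate_no_omegaconf_artifacts; infer_instance

-- ===== CLAIM (what is proved, stated in full; the proofs are below) =====
def Claim_equal_validate_no_omegaconf_artifacts : Prop := ∀ (training_yaml_content : String) (recipe_file_path : String), Dom_validate_no_omegaconf_artifacts training_yaml_content recipe_file_path → Spec_validate_no_omegaconf_artifacts training_yaml_content recipe_file_path (validate_no_omegaconf_artifacts training_yaml_content recipe_file_path)

-- ===== LEMMAS AND PROOFS =====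

-- what one line contributes to one pattern's example list in B
def pvUpd (p : String) (l : String) (n : Int) (e : List String) : List String :=
  if PySem.Str.isIn p l && decide (e.length < 3) then e ++ [pvLineMsgB n l] else e

-- B's effect on a single pattern's example list, over all lines
def pvColB (p : String) (lines : List String) (n : Int) (e : List String) : List String :=
  match lines with
  | [] => e
  | l :: rest => pvColB p rest (n + 1) (pvUpd p l n e)

theorem pvStepKey_keys (n : Int) (l : String) (d : PySem.Dict String (List String))
    (k : String) (hk : k ∈ d.keys) : (pvStepKey n l d k).keys = d.keys := by
  unfold pvStepKey
  split_ifs with h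
  · exact PySem.Dict.keys_insert_of_contains d _ ((PySem.Dict.contains_iff_mem_keys d k).2 hk)
  · rfl

theorem pvStepKey_getD (n : Int) (l : String) (d : PySem.Dict String (List String))
    (k p : String) :
    (pvStepKey n l d k).getD p [] =
      if p = k then pvUpd p l n (d.getD p []) else d.getD p [] := by
  unfold pvStepKey pvUpd
  by_cases hpk : p = k
  · subst hpk
    split_ifs with h <;> simp_all [PySem.Dict.modify, PySem.Dict.getD_insert_self]
  · split_ifs with h <;> simp_all [PySem.Dict.modify, PySem.Dict.getD_insert]

theorem pvInnerFold (n : Int) (l : String) (ks : List String) :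
    ∀ (d : PySem.Dict String (List String)), ks.Nodup → (∀ k ∈ ks, k ∈ d.keys) →
    (ks.foldl (pvStepKey n l) d).keys = d.keys ∧
    (∀ p, (ks.foldl (pvStepKey n l) d).getD p [] =
      if p ∈ ks then pvUpd p l n (d.getD p []) else d.getD p []) := by
  induction ks with
  | nil => intro d _ _; simp
  | cons k rest ih =>
    intro d hnd hmem
    have hk : k ∈ d.keys := hmem k (List.mem_cons_self ..)
    have hkeys1 : (pvStepKey n l d k).keys = d.keys := pvStepKey_keys n l d k hk
    have hrest : ∀ k' ∈ rest, k' ∈ (pvStepKey n l d k).keys := by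
      intro k' h'; rw [hkeys1]; exact hmem k' (List.mem_cons_of_mem _ h')
    obtain ⟨hkeys2, hget2⟩ := ih (pvStepKey n l d k) (List.Nodup.of_cons hnd) hrest
    constructor
    · simp only [List.foldl_cons]; rw [hkeys2, hkeys1]
    · intro p
      simp only [List.foldl_cons]
      rw [hget2 p, pvStepKey_getD]
      by_cases hpk : p = k
      · subst hpk
        have : p ∉ rest := (List.nodup_cons.1 hnd).1
        simp [this]
      · by_cases hpr : p ∈ rest <;> simp [hpk, hpr]

theorem pvOuterFold (lines : List String) :
    ∀ (n : Int) (d : PySem.Dict String (List String)), d.keys.Nodup →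
    ((PySem.List.enumerate lines n).foldl pvStepLine d).keys = d.keys ∧
    (∀ p ∈ d.keys, ((PySem.List.enumerate lines n).foldl pvStepLine d).getD p [] =
      pvColB p lines n (d.getD p [])) := by
  induction lines with
  | nil => intro n d _; simp [pvColB]
  | cons l rest ih =>
    intro n d hnd
    obtain ⟨hkeys1, hget1⟩ :=
      pvInnerFold n l d.keys d hnd (fun k hk => hk)
    have hd1 : (pvStepLine d (n, l)).keys = d.keys := hkeys1
    obtain ⟨hkeys2, hget2⟩ := ih (n + 1) (pvStepLine d (n, l)) (hd1 ▸ hnd)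
    constructor
    · rw [PySem.List.enumerate_cons, List.foldl_cons, hkeys2, hd1]
    · intro p hp
      rw [PySem.List.enumerate_cons, List.foldl_cons, pvColB,
          hget2 p (hd1 ▸ hp)]
      congr 1
      have := hget1 p
      simpa [pvStepLine, hp] using this

theorem pvColB_frozen (p : String) (lines : List String) :
    ∀ (n : Int) (e : List String), 3 ≤ e.length → pvColB p lines n e = e := by
  induction lines with
  | nil => intro n e _; rfl
  | cons l rest ih =>
    intro n e he
    have hlt : ¬ e.length < 3 := by omega
    have hupd : pvUpd p l n e = e := by
      unfold pvUpd; rw [if_neg]; simp [hlt]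
    rw [pvColB, hupd]; exact ih (n + 1) e he

theorem pvCollectA_eq (p : String) (lines : List String) :
    ∀ (n : Int) (e : List String), e.length < 3 →
    pvCollectA p lines n e = pvColB p lines n e := by
  induction lines with
  | nil => intro n e _; rfl
  | cons l rest ih =>
    intro n e he
    have hmsg : pvLineMsgA = pvLineMsgB := rfl
    rw [pvCollectA, pvColB]
    by_cases hin : PySem.Str.isIn p l = true
    · have hin' : PySem.Chars.isIn p.toList l.toList = true := by simpa using hin
      have hupd : pvUpd p l n e = e ++ [pvLineMsgB n l] := by
        unfold pvUpd; rw [if_pos]; simp [hin', he]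
      rw [if_pos hin, hupd, hmsg]
      by_cases hlen : 3 ≤ (e ++ [pvLineMsgB n l]).length
      · rw [if_pos hlen, pvColB_frozen p rest (n + 1) _ hlen]
      · rw [if_neg hlen]
        exact ih (n + 1) _ (by simp at hlen ⊢; omega)
    · have hin' : ¬ PySem.Chars.isIn p.toList l.toList = true := by simpa using hin
      have hupd : pvUpd p l n e = e := by
        unfold pvUpd; rw [if_neg]; simp [hin']
      rw [if_neg hin, hupd]
      exact ih (n + 1) e he

-- the final example list B stores for pattern p
theorem pvExamples_getD (c : String) (p : String)
    (hp : p ∈ ["${", "oc.select", "OmegaConf.select", "omegaconf.select"]) :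
    ((PySem.List.enumerate ((PySem.Str.split? c "\n").getD []) 1).foldl pvStepLine
        (PySem.Dict.mk (pvPatternsB.map (fun pd => (pd.1, ([] : List String)))))).getD p []
      = pvCollectA p ((PySem.Str.split? c "\n").getD []) 1 [] := by
  have hkeys : (PySem.Dict.mk (pvPatternsB.map (fun pd => (pd.1, ([] : List String))))).keys
      = ["${", "oc.select", "OmegaConf.select", "omegaconf.select"] := rfl
  obtain ⟨_, hget⟩ := pvOuterFold ((PySem.Str.split? c "\n").getD []) 1
    (PySem.Dict.mk (pvPatternsB.map (fun pd => (pd.1, ([] : List String)))))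
    (by rw [hkeys]; decide)
  rw [hget p (by rw [hkeys]; exact hp)]
  have h0 : (PySem.Dict.mk (pvPatternsB.map (fun pd => (pd.1, ([] : List String))))).getD p []
      = ([] : List String) := by
    fin_cases hp <;> rfl
  rw [h0, pvCollectA_eq p _ 1 [] (by simp)]

-- ===== VERDICT (by name: the statement is the Claim_ definition above) =====
theorem validate_no_omegaconf_artifacts_spec : Claim_equal_validate_no_omegaconf_artifacts := by
  intro c r _
  unfold Spec_validate_no_omegaconf_artifacts
  unfold validate_no_omegaconf_artifacts validate_no_omegaconf_artifacts_alt
  have h1 := pvExamples_getD c "${" (by simp)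
  have h2 := pvExamples_getD c "oc.select" (by simp)
  have h3 := pvExamples_getD c "OmegaConf.select" (by simp)
  have h4 := pvExamples_getD c "omegaconf.select" (by simp)
  simp only [pvPatternsA, pvPatternsB, List.foldl_cons, List.foldl_nil] at h1 h2 h3 h4 ⊢
  rw [h1, h2, h3, h4]
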